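-- pv_equiv track=rewrite | github.com/tarik1bosunia/facebook-whatsapp-business-automation-backend | messaging/services/chat_message_service.py | _validate_content_type
-- ===== SOURCE A (Python) =====
-- def _validate_content_type(content_type: str, media_type: str) -> bool:
--     """
--     Verify that the content type matches the expected media type.
--     """
--     if media_type == 'image':
--         return content_type.startswith('image/')
--     elif media_type == 'video':
--         return content_type.startswith('video/')
--     elif media_type == 'audio':
--         # Accept video/mp4 as audio (common with Facebook Messenger)
--         return content_type.startswith('audio/') or content_type == 'video/mp4'
--
--     elif media_type == 'file':
--     # Accept common document types
--         return any(content_type.startswith(prefix) for prefix in [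
--             'application/pdf',
--             'application/msword',
--             'application/vnd.openxmlformats-officedocument',
--             'text/plain'
--         ])
--     return True  # For other types, don't validate
-- ===== SOURCE B (Python) =====
-- # Restructured: parse content_type once into major/sub at the first '/', then compare components,
-- # instead of prefix-matching whole "type/subtype" strings per branch.
-- def _validate_content_type(content_type: str, media_type: str) -> bool:
--     if media_type not in ('image', 'video', 'audio', 'file'):
--         return True  # other media types are not validated
--     major, slash, sub = content_type.partition('/')
--     if not slash:
--         return False  # no '/' => cannot match any required "type/..." form
--     if media_type == 'audio':
--         return major == 'audio' or (major == 'video' and sub == 'mp4')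
--     if media_type == 'file':
--         return (major == 'text' and sub.startswith('plain')) or \
--                (major == 'application' and
--                 sub.startswith(('pdf', 'msword', 'vnd.openxmlformats-officedocument')))
--     return major == media_type
-- ===== Notes on version B (the rewrite author's own statement) =====
-- stated objective: alternative
-- what changed: B parses content_type once with partition('/') into its major type and subtype and then compares/prefix-matches the components per media type, instead of A's branch-by-branch prefix matching of whole 'type/subtype' strings.
import Mathlib
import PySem

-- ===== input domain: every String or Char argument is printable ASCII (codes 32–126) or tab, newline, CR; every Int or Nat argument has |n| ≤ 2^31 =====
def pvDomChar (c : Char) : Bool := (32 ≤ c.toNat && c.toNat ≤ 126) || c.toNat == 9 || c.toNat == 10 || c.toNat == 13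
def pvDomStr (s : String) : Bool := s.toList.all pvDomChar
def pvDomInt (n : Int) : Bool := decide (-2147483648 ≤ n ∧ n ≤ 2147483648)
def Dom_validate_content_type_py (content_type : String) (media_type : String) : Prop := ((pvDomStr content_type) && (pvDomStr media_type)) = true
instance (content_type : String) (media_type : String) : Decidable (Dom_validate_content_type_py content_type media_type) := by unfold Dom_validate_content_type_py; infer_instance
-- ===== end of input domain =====

-- B parses content_type once into major/sub at the first '/' and compares components, instead of A's per-branch whole-string prefix matching (alternative, same cost).


-- ===== PORT A =====
def validate_content_type_py (content_type : String) (media_type : String) : Bool :=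
  if media_type == "image" then
    PySem.Str.startswith content_type "image/"
  else if media_type == "video" then
    PySem.Str.startswith content_type "video/"
  else if media_type == "audio" then
    PySem.Str.startswith content_type "audio/" || content_type == "video/mp4"
  else if media_type == "file" then
    ["application/pdf", "application/msword",
     "application/vnd.openxmlformats-officedocument", "text/plain"].any
      (fun prefix_ => PySem.Str.startswith content_type prefix_)
  else
    true

-- ===== PORT B =====
def validate_content_type_py_alt (content_type : String) (media_type : String) : Bool :=
  if !(media_type == "image" || media_type == "video" || media_type == "audio" || media_type == "file") then
    true
  else
    -- content_type.partition('/') ported by hand: takeWhile/dropWhile at the first '/' is exact for a 1-char separator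
    let major := content_type.toList.takeWhile (· ≠ '/')
    match content_type.toList.dropWhile (· ≠ '/') with
    | [] => false   -- no '/': empty `slash` in Python
    | _ :: sub =>
      if media_type == "audio" then
        major == "audio".toList || (major == "video".toList && sub == "mp4".toList)
      else if media_type == "file" then
        (major == "text".toList && PySem.Chars.startswith sub "plain".toList)
          || (major == "application".toList &&
              ["pdf", "msword", "vnd.openxmlformats-officedocument"].any
                (fun p => PySem.Chars.startswith sub p.toList))
      else
        major == media_type.toList

-- ===== PRECONDITION & SPEC =====
def Spec_validate_content_type_py (content_type : String) (media_type : String) (out : Bool) : Prop := out = validate_content_type_py_alt content_type media_type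
instance (content_type : String) (media_type : String) (out : Bool) : Decidable (Spec_validate_content_type_py content_type media_type out) := by unfold Spec_validate_content_type_py; infer_instance

-- ===== CLAIM (what is proved, stated in full; the proofs are below) =====
def Claim_equal_validate_content_type_py : Prop := ∀ (content_type : String) (media_type : String), Dom_validate_content_type_py content_type media_type → Spec_validate_content_type_py content_type media_type (validate_content_type_py content_type media_type)

-- ===== LEMMAS AND PROOFS =====

-- (p ++ '/' :: q) is a prefix of cs  iff  cs's part before its first '/' is exactly p and q is a prefix of the part after it.
theorem pv_prefix_slash_iff (p q cs : List Char) (hp : '/' ∉ p) :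
    (p ++ '/' :: q) <+: cs ↔
      (cs.takeWhile (· ≠ '/') = p ∧
        ∃ rest, cs.dropWhile (· ≠ '/') = '/' :: rest ∧ q <+: rest) := by
  induction p generalizing cs with
  | nil =>
    cases cs with
    | nil => simp
    | cons c cs' =>
      by_cases hc : c = '/'
      · subst hc; simp [List.takeWhile, List.dropWhile, List.cons_prefix_cons]
      · simp [List.takeWhile, List.dropWhile, hc, List.cons_prefix_cons, Ne.symm hc]
  | cons a p' ih =>
    have ha : a ≠ '/' := fun h => hp (h ▸ List.mem_cons_self)
    have hp' : '/' ∉ p' := fun h => hp (List.mem_cons_of_mem _ h)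
    cases cs with
    | nil => simp
    | cons c cs' =>
      by_cases hc : c = '/'
      · subst hc
        simp only [List.cons_append, List.cons_prefix_cons, List.takeWhile, List.dropWhile]
        simp [ha]
      · simp only [List.cons_append, List.cons_prefix_cons, List.takeWhile, List.dropWhile]
        simp [hc, ih cs' hp', eq_comm (a := a) (b := c)]
        tauto

-- cs equals p ++ '/' :: q  iff  its first-'/' split is exactly (p, '/' :: q), for '/' ∉ p.
theorem pv_eq_slash_iff (p q cs : List Char) (hp : '/' ∉ p) :
    cs = p ++ '/' :: q ↔
      (cs.takeWhile (· ≠ '/') = p ∧ cs.dropWhile (· ≠ '/') = '/' :: q) := by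
  constructor
  · rintro rfl
    have hall : ∀ a ∈ p, decide (a ≠ '/') = true := by
      intro a haa; simp only [decide_eq_true_eq]; intro h; exact hp (h ▸ haa)
    constructor
    · rw [List.takeWhile_append_of_pos hall]; simp [List.takeWhile]
    · rw [List.dropWhile_append_of_pos hall]; simp [List.dropWhile]
  · rintro ⟨h1, h2⟩
    conv_lhs => rw [← List.takeWhile_append_dropWhile (p := (· ≠ '/')) (l := cs)]
    rw [h1, h2]

-- the head of dropWhile (· ≠ '/') is '/'
theorem pv_dropWhile_head (cs : List Char) (hd : Char) (tl : List Char)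
    (h : cs.dropWhile (· ≠ '/') = hd :: tl) : hd = '/' := by
  induction cs with
  | nil => simp [List.dropWhile] at h
  | cons c cs' ih =>
    by_cases hc : c = '/'
    · subst hc; simp [List.dropWhile] at h; exact h.1.symm
    · simp [List.dropWhile, hc] at h
      exact ih (by simp only [ne_eq, decide_not]; exact h)

-- ===== VERDICT (by name: the statement is the Claim_ definition above) =====
theorem validate_content_type_py_spec : Claim_equal_validate_content_type_py := by
  intro ct mt _
  unfold Spec_validate_content_type_py validate_content_type_py validate_content_type_py_alt
  by_cases h1 : mt = "image"
  · subst h1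
    simp only [beq_self_eq_true, if_true, Bool.true_or, Bool.not_true, Bool.false_eq_true, if_false]
    rw [Bool.eq_iff_iff]
    cases hdw : ct.toList.dropWhile (· ≠ '/') with
    | nil =>
      simp only [PySem.Str.startswith_eq, PySem.Chars.startswith_iff]
      rw [show ("image/" : String).toList = "image".toList ++ '/' :: ([] : List Char) from by decide]
      rw [pv_prefix_slash_iff _ _ _ (by decide)]
      simp only [ne_eq, decide_not] at hdw
      simp [hdw]
    | cons hd sub =>
      have := pv_dropWhile_head _ _ _ hdw; subst this
      simp only [PySem.Str.startswith_eq, PySem.Chars.startswith_iff]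
      rw [show ("image/" : String).toList = "image".toList ++ '/' :: ([] : List Char) from by decide]
      rw [pv_prefix_slash_iff _ _ _ (by decide)]
      simp only [ne_eq, decide_not] at hdw
      simp [hdw]
  by_cases h2 : mt = "video"
  · subst h2
    simp only [beq_self_eq_true, if_true, Bool.true_or, Bool.or_true, Bool.not_true,
      Bool.false_eq_true, if_false, show (("video" : String) == "image") = false from by decide]
    rw [Bool.eq_iff_iff]
    cases hdw : ct.toList.dropWhile (· ≠ '/') with
    | nil =>
      simp only [PySem.Str.startswith_eq, PySem.Chars.startswith_iff]
      rw [show ("video/" : String).toList = "video".toList ++ '/' :: ([] : List Char) from by decide]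
      rw [pv_prefix_slash_iff _ _ _ (by decide)]
      simp only [ne_eq, decide_not] at hdw
      simp [hdw]
    | cons hd sub =>
      have := pv_dropWhile_head _ _ _ hdw; subst this
      simp only [PySem.Str.startswith_eq, PySem.Chars.startswith_iff]
      rw [show ("video/" : String).toList = "video".toList ++ '/' :: ([] : List Char) from by decide]
      rw [pv_prefix_slash_iff _ _ _ (by decide)]
      simp only [ne_eq, decide_not] at hdw
      simp [hdw]
  by_cases h3 : mt = "audio"
  · subst h3
    simp only [beq_self_eq_true, if_true, Bool.true_or, Bool.or_true, Bool.not_true,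
      Bool.false_eq_true, if_false,
      show (("audio" : String) == "image") = false from by decide,
      show (("audio" : String) == "video") = false from by decide]
    rw [Bool.eq_iff_iff]
    cases hdw : ct.toList.dropWhile (· ≠ '/') with
    | nil =>
      simp only [PySem.Str.startswith_eq, PySem.Chars.startswith_iff, Bool.or_eq_true,
        beq_iff_eq, ← String.toList_inj]
      rw [show ("audio/" : String).toList = "audio".toList ++ '/' :: ([] : List Char) from by decide,
          show ("video/mp4" : String).toList = "video".toList ++ '/' :: ("mp4".toList) from by decide]
      rw [pv_prefix_slash_iff _ _ _ (by decide), pv_eq_slash_iff _ _ _ (by decide)]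
      simp only [ne_eq, decide_not] at hdw
      simp [hdw]
    | cons hd sub =>
      have := pv_dropWhile_head _ _ _ hdw; subst this
      simp only [PySem.Str.startswith_eq, PySem.Chars.startswith_iff, Bool.or_eq_true,
        beq_iff_eq, ← String.toList_inj]
      rw [show ("audio/" : String).toList = "audio".toList ++ '/' :: ([] : List Char) from by decide,
          show ("video/mp4" : String).toList = "video".toList ++ '/' :: ("mp4".toList) from by decide]
      rw [pv_prefix_slash_iff _ _ _ (by decide), pv_eq_slash_iff _ _ _ (by decide)]
      simp only [ne_eq, decide_not] at hdw
      simp [hdw, List.cons.injEq]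
  by_cases h4 : mt = "file"
  · subst h4
    simp only [beq_self_eq_true, if_true, Bool.true_or, Bool.or_true, Bool.not_true,
      Bool.false_eq_true, if_false, List.any_cons, List.any_nil,
      show (("file" : String) == "image") = false from by decide,
      show (("file" : String) == "video") = false from by decide,
      show (("file" : String) == "audio") = false from by decide]
    rw [Bool.eq_iff_iff]
    cases hdw : ct.toList.dropWhile (· ≠ '/') with
    | nil =>
      simp only [PySem.Str.startswith_eq, PySem.Chars.startswith_iff, Bool.or_eq_true, Bool.or_false]
      rw [show ("application/pdf" : String).toList = "application".toList ++ '/' :: ("pdf".toList) from by decide,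
          show ("application/msword" : String).toList = "application".toList ++ '/' :: ("msword".toList) from by decide,
          show ("application/vnd.openxmlformats-officedocument" : String).toList = "application".toList ++ '/' :: ("vnd.openxmlformats-officedocument".toList) from by decide,
          show ("text/plain" : String).toList = "text".toList ++ '/' :: ("plain".toList) from by decide]
      rw [pv_prefix_slash_iff _ _ _ (by decide), pv_prefix_slash_iff _ _ _ (by decide),
          pv_prefix_slash_iff _ _ _ (by decide), pv_prefix_slash_iff _ _ _ (by decide)]
      simp only [ne_eq, decide_not] at hdw
      simp [hdw]
    | cons hd sub =>
      have := pv_dropWhile_head _ _ _ hdw; subst this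
      simp only [PySem.Str.startswith_eq, PySem.Chars.startswith_iff, Bool.or_eq_true, Bool.or_false]
      rw [show ("application/pdf" : String).toList = "application".toList ++ '/' :: ("pdf".toList) from by decide,
          show ("application/msword" : String).toList = "application".toList ++ '/' :: ("msword".toList) from by decide,
          show ("application/vnd.openxmlformats-officedocument" : String).toList = "application".toList ++ '/' :: ("vnd.openxmlformats-officedocument".toList) from by decide,
          show ("text/plain" : String).toList = "text".toList ++ '/' :: ("plain".toList) from by decide]
      rw [pv_prefix_slash_iff _ _ _ (by decide), pv_prefix_slash_iff _ _ _ (by decide),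
          pv_prefix_slash_iff _ _ _ (by decide), pv_prefix_slash_iff _ _ _ (by decide)]
      simp only [ne_eq, decide_not] at hdw
      simp [hdw, PySem.Chars.startswith_iff, List.cons.injEq]
      tauto
  · simp [h1, h2, h3, h4]
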